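-- pv_equiv track=rewrite | github.com/mohsennajjar-tau/Clinical-Reasoning-Distillation | shared_utils.py | step_char_spans_from_chosen_tokens
-- ===== SOURCE A (Python) =====
-- def step_char_spans_from_chosen_tokens(logprobs_steps):
--     spans = []
--     buf = ""
--     for st in logprobs_steps or []:
--         tok = (st.get("chosen") or {}).get("token", "")
--         start = len(buf)
--         buf += tok
--         end = len(buf)
--         spans.append((start, end))
--     return spans
-- ===== SOURCE B (Python) =====
-- def step_char_spans_from_chosen_tokens(logprobs_steps):
--     toks = [(st.get("chosen") or {}).get("token", "") for st in (logprobs_steps or [])]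
--     offsets = [0]
--     total = 0
--     for t in toks:
--         total += len(t)
--         offsets.append(total)
--     return list(zip(offsets, offsets[1:]))
-- ===== Notes on version B (the rewrite author's own statement) =====
-- stated objective: alternative
-- what changed: Replaces the single interleaved buffer-accumulating loop (which builds the growing string and appends spans in one pass) with a prefix-sum offsets table over the token lengths followed by a separate zip-pairing pass; no string is ever concatenated.
import Mathlib
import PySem

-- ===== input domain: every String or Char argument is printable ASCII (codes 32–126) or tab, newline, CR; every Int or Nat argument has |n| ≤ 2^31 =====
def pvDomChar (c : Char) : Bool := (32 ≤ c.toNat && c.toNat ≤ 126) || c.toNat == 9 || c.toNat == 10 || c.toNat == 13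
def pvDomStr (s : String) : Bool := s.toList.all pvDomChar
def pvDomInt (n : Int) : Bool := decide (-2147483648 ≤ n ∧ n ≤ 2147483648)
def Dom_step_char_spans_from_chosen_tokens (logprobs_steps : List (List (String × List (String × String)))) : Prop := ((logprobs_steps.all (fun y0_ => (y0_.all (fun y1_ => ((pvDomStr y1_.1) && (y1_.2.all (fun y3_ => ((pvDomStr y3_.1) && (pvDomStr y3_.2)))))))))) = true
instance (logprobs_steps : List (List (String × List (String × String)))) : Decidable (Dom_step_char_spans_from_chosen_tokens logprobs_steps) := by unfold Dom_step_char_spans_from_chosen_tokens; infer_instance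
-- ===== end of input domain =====

-- ===== PORT A =====
-- B is an alternative decomposition: a prefix-sum offsets table over token lengths
-- plus a zip-pairing pass, instead of A's single loop that grows a buffer string.

-- shared helper: Python `(st.get("chosen") or {}).get("token", "")` (value type is a dict,
-- so `or {}` only replaces a missing/empty dict by {}, which looks up to the same "")
def pvChosenToken (st : List (String × List (String × String))) : String :=
  PySem.Dict.getD (PySem.Dict.mk (((PySem.Dict.mk st).get? "chosen").getD [])) "token" ""

def step_char_spans_from_chosen_tokens (logprobs_steps : List (List (String × List (String × String)))) : List (Int × Int) :=
  (logprobs_steps.foldl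
    (fun (acc : List (Int × Int) × String) st =>
      let tok := pvChosenToken st
      let start := PySem.Str.len acc.2
      let buf := acc.2 ++ tok
      let e := PySem.Str.len buf
      (acc.1 ++ [(start, e)], buf))
    ([], "")).1

-- ===== PORT B =====
def step_char_spans_from_chosen_tokens_alt (logprobs_steps : List (List (String × List (String × String)))) : List (Int × Int) :=
  let toks := logprobs_steps.map pvChosenToken
  let offsets :=
    (toks.foldl
      (fun (acc : List Int × Int) t =>
        let total := acc.2 + PySem.Str.len t
        (acc.1 ++ [total], total))
      ([0], 0)).1
  offsets.zip (PySem.List.slice offsets (some 1) none)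

-- ===== PRECONDITION & SPEC =====
def Spec_step_char_spans_from_chosen_tokens (logprobs_steps : List (List (String × List (String × String)))) (out : List (Int × Int)) : Prop := out = step_char_spans_from_chosen_tokens_alt logprobs_steps
instance (logprobs_steps : List (List (String × List (String × String)))) (out : List (Int × Int)) : Decidable (Spec_step_char_spans_from_chosen_tokens logprobs_steps out) := by unfold Spec_step_char_spans_from_chosen_tokens; infer_instance

-- ===== CLAIM (what is proved, stated in full; the proofs are below) =====
def Claim_equal_step_char_spans_from_chosen_tokens : Prop := ∀ (logprobs_steps : List (List (String × List (String × String)))), Dom_step_char_spans_from_chosen_tokens logprobs_steps → Spec_step_char_spans_from_chosen_tokens logprobs_steps (step_char_spans_from_chosen_tokens logprobs_steps)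

-- ===== LEMMAS AND PROOFS =====

-- reference: spans of consecutive tokens starting at character offset c
def pvSpansFrom (c : Int) : List String → List (Int × Int)
  | [] => []
  | t :: ts => (c, c + PySem.Str.len t) :: pvSpansFrom (c + PySem.Str.len t) ts

-- reference: offsets table starting at c over a list of lengths
def pvOffsFrom (c : Int) : List Int → List Int
  | [] => [c]
  | n :: ns => c :: pvOffsFrom (c + n) ns

lemma pvOffsFrom_cons_head (c : Int) (l : List Int) :
    pvOffsFrom c l = c :: (pvOffsFrom c l).tail := by
  cases l <;> rfl

lemma foldA_eq (l : List (List (String × List (String × String))))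
    (spans : List (Int × Int)) (buf : String) :
    (l.foldl
      (fun (acc : List (Int × Int) × String) st =>
        let tok := pvChosenToken st
        let start := PySem.Str.len acc.2
        let b := acc.2 ++ tok
        let e := PySem.Str.len b
        (acc.1 ++ [(start, e)], b))
      (spans, buf)).1
    = spans ++ pvSpansFrom (PySem.Str.len buf) (l.map pvChosenToken) := by
  induction l generalizing spans buf with
  | nil => simp [pvSpansFrom]
  | cons st l ih =>
      simp only [List.foldl_cons, List.map_cons, pvSpansFrom]
      rw [ih]
      simp

lemma foldB_eq (toks : List String) (acc : List Int) (c : Int) :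
    (toks.foldl
      (fun (acc : List Int × Int) t =>
        let total := acc.2 + PySem.Str.len t
        (acc.1 ++ [total], total))
      (acc ++ [c], c)).1
    = acc ++ pvOffsFrom c (toks.map PySem.Str.len) := by
  induction toks generalizing acc c with
  | nil => simp [pvOffsFrom]
  | cons n ns ih =>
      simp only [List.foldl_cons, List.map_cons, pvOffsFrom]
      have := ih (acc ++ [c]) (c + PySem.Str.len n)
      simpa using this

lemma zip_offs (toks : List String) (c : Int) :
    (pvOffsFrom c (toks.map PySem.Str.len)).zip (pvOffsFrom c (toks.map PySem.Str.len)).tail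
    = pvSpansFrom c toks := by
  induction toks generalizing c with
  | nil => simp [pvOffsFrom, pvSpansFrom]
  | cons t ts ih =>
      simp only [List.map_cons, pvOffsFrom, pvSpansFrom, List.tail_cons]
      rw [pvOffsFrom_cons_head (c + PySem.Str.len t)]
      simp only [List.zip_cons_cons]
      rw [← pvOffsFrom_cons_head]
      rw [ih]

-- ===== VERDICT (by name: the statement is the Claim_ definition above) =====
theorem step_char_spans_from_chosen_tokens_spec : Claim_equal_step_char_spans_from_chosen_tokens := by
  intro l _
  unfold Spec_step_char_spans_from_chosen_tokens
  unfold step_char_spans_from_chosen_tokens step_char_spans_from_chosen_tokens_alt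
  rw [foldA_eq]
  simp only []
  have hB := foldB_eq (l.map pvChosenToken) [] 0
  simp only [List.nil_append] at hB
  rw [hB, PySem.List.slice_from_one, zip_offs]
  simp
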